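-- pv_equiv track=rewrite | github.com/EliBildman/UMA | 383/383homework0/mustard_analytics.py | num_single_locs
-- ===== SOURCE A (Python) =====
-- def num_single_locs(rows):
--     """Return the number of refueling locations that were visited exactly once.
--
--     Hint: store the locations and counts (as keys and values, respectively) in a dictionary,
--     then count up the number of entries with a value equal to one.
--     """
--     stations = {}
--
--     for row in rows:
--
--       if row[2] == None:
--         continue
--
--       if row[2] in stations:
--         stations[row[2]] += 1
--       else:
--         stations[row[2]] = 1
--
--     ones = 0
--
--     for station in stations:
--       if stations[station] == 1:
--         ones += 1
--
--     return ones
-- ===== SOURCE B (Python) =====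
-- def num_single_locs(rows):
--     seen_once = set()
--     seen_more = set()
--     for row in rows:
--         loc = row[2]
--         if loc is None:
--             continue
--         if loc in seen_more:
--             continue
--         if loc in seen_once:
--             seen_once.discard(loc)
--             seen_more.add(loc)
--         else:
--             seen_once.add(loc)
--     return len(seen_once)
-- ===== Notes on version B (the rewrite author's own statement) =====
-- stated objective: alternative
-- what changed: Replaces the count dictionary plus a second pass over its keys with a single pass maintaining two sets (seen once / seen more than once), returning the size of the first.
import Mathlib
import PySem

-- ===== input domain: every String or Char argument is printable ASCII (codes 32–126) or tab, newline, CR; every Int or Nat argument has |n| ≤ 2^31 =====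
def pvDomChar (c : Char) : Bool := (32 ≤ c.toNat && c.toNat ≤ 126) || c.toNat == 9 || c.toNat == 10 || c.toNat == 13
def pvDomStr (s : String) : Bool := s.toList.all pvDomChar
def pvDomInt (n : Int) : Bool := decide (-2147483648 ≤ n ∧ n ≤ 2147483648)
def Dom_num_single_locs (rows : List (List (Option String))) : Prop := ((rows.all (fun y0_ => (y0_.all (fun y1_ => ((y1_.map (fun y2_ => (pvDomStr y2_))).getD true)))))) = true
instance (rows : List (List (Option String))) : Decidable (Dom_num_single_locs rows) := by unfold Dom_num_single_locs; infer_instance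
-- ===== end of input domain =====

-- B maintains two membership sets in ONE pass instead of A's count dict plus a second pass over the keys.
-- ===== PORT A =====
-- A's dict-building loop: skip rows whose third entry is None, else bump the count of that location.
def pvAStep (st : PySem.Dict String Int) (row : List (Option String)) : PySem.Dict String Int :=
  match PySem.List.pyGet? row 2 with
  | none => st              -- row[2] raises IndexError in Python: excluded by Pre_
  | some none => st         -- 'continue'
  | some (some loc) =>
      match st.get? loc with
      | some c => st.insert loc (c + 1)
      | none   => st.insert loc 1

def num_single_locs (rows : List (List (Option String))) : Int :=
  let stations := rows.foldl pvAStep PySem.Dict.empty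
  -- second loop: every station iterated is a key, so stations[station] = getD station 0
  stations.keys.foldl (fun ones station => if stations.getD station 0 == 1 then ones + 1 else ones) 0

-- ===== PORT B =====
def pvBStep (s : PySem.Set String × PySem.Set String) (loc : String) : PySem.Set String × PySem.Set String :=
  if PySem.Set.contains s.2 loc then s
  else if PySem.Set.contains s.1 loc then (PySem.Set.discard s.1 loc, PySem.Set.add s.2 loc)
  else (PySem.Set.add s.1 loc, s.2)

def num_single_locs_alt (rows : List (List (Option String))) : Int :=
  let st := rows.foldl (fun s row =>
      match PySem.List.pyGet? row 2 with
      | some (some loc) => pvBStep s loc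
      | _ => s) (PySem.Set.empty, PySem.Set.empty)
  PySem.Set.len st.1

-- ===== PRECONDITION & SPEC =====
-- Pre_ excludes exactly the inputs where Python A raises IndexError: a row shorter than 3 entries.
def Pre_num_single_locs (rows : List (List (Option String))) : Prop :=
  ∀ row ∈ rows, 3 ≤ row.length
instance (rows : List (List (Option String))) : Decidable (Pre_num_single_locs rows) := by unfold Pre_num_single_locs; infer_instance

def pvWitness_num_single_locs : List (List (Option String)) :=
  [[some "a", none, some "x"], [none, none, some "x"], [some "b", none, some "y"], [some "c", none, none]]

def Spec_num_single_locs (rows : List (List (Option String))) (out : Int) : Prop := out = num_single_locs_alt rows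
instance (rows : List (List (Option String))) (out : Int) : Decidable (Spec_num_single_locs rows out) := by unfold Spec_num_single_locs; infer_instance

-- ===== CLAIM (what is proved, stated in full; the proofs are below) =====
def Claim_equal_num_single_locs : Prop := ∀ (rows : List (List (Option String))), Dom_num_single_locs rows → Pre_num_single_locs rows → Spec_num_single_locs rows (num_single_locs rows)

-- ===== LEMMAS AND PROOFS =====

-- the locations actually processed, in order
def pvLocs (rows : List (List (Option String))) : List String :=
  rows.filterMap (fun row => (PySem.List.pyGet? row 2).getD none)

lemma pvAStep_eq (st : PySem.Dict String Int) (row : List (Option String)) :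
    pvAStep st row =
      match (PySem.List.pyGet? row 2).getD none with
      | some loc => st.modify loc 0 (· + 1)
      | none => st := by
  unfold pvAStep
  cases h : PySem.List.pyGet? row 2 with
  | none => simp
  | some o =>
    cases o with
    | none => simp
    | some loc =>
      simp only [Option.getD_some]
      cases hg : st.get? loc with
      | none => simp [PySem.Dict.modify, PySem.Dict.getD, hg]
      | some c => simp [PySem.Dict.modify, PySem.Dict.getD, hg]

lemma pvA_dict (rows : List (List (Option String))) :
    rows.foldl pvAStep PySem.Dict.empty = PySem.Dict.counter (pvLocs rows) := by
  unfold PySem.Dict.counter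
  rw [pvLocs, List.foldl_filterMap]
  congr 1
  funext st row
  rw [pvAStep_eq]
  cases (PySem.List.pyGet? row 2).getD none <;> rfl

lemma pvB_fold (rows : List (List (Option String))) :
    rows.foldl (fun s row =>
      match PySem.List.pyGet? row 2 with
      | some (some loc) => pvBStep s loc
      | _ => s) (PySem.Set.empty, PySem.Set.empty)
    = (pvLocs rows).foldl pvBStep (PySem.Set.empty, PySem.Set.empty) := by
  rw [pvLocs, List.foldl_filterMap]
  congr 1
  funext s row
  cases h : PySem.List.pyGet? row 2 with
  | none => simp
  | some o => cases o <;> simp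

-- invariant for B's loop: o is exactly the elements seen once so far, m those seen at least twice
def pvInv (c : String → Nat) (s : PySem.Set String × PySem.Set String) : Prop :=
  s.1.Nodup ∧ (∀ k, k ∈ s.1 ↔ c k = 1) ∧ (∀ k, k ∈ s.2 ↔ 2 ≤ c k)

lemma pvInv_step (c : String → Nat) (s : PySem.Set String × PySem.Set String) (x : String)
    (h : pvInv c s) : pvInv (fun k => if x = k then c k + 1 else c k) (pvBStep s x) := by
  obtain ⟨hnd, ho, hm⟩ := h
  unfold pvBStep
  split_ifs with h2 h1
  · -- x already seen at least twice: state unchanged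
    have hx2 : 2 ≤ c x := (hm x).mp (by simpa [PySem.Set.contains] using h2)
    refine ⟨hnd, fun k => ?_, fun k => ?_⟩ <;> beta_reduce <;> by_cases hk : x = k
    · subst hk; rw [if_pos rfl]
      exact ⟨fun hx => absurd ((ho x).mp hx) (by omega), fun hc => absurd hc (by omega)⟩
    · rw [if_neg hk]; exact ho k
    · subst hk; rw [if_pos rfl]
      exact ⟨fun _ => by omega, fun _ => (hm x).mpr hx2⟩
    · rw [if_neg hk]; exact hm k
  · -- second sighting of x: move it from s.1 to s.2
    have hx1 : x ∈ s.1 := by simpa [PySem.Set.contains] using h1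
    have hcx : c x = 1 := (ho x).mp hx1
    have hd : ∀ j, j ∈ PySem.Set.discard s.1 x ↔ (j ∈ s.1 ∧ ¬ j = x) := fun j => by
      simp [PySem.Set.discard, List.mem_filter]
    refine ⟨hnd.filter _, fun k => ?_, fun k => ?_⟩ <;> beta_reduce <;> by_cases hk : x = k
    · subst hk; rw [if_pos rfl, hd x]
      exact ⟨fun hmem => absurd rfl hmem.2, fun hc => absurd hc (by omega)⟩
    · rw [if_neg hk, hd k]
      exact ⟨fun hmem => (ho k).mp hmem.1, fun hc => ⟨(ho k).mpr hc, fun h' => hk h'.symm⟩⟩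
    · subst hk; rw [if_pos rfl, PySem.Set.mem_add]
      exact ⟨fun _ => by omega, fun _ => Or.inr rfl⟩
    · rw [if_neg hk, PySem.Set.mem_add]
      constructor
      · rintro (h' | h')
        · exact (hm k).mp h'
        · exact absurd h'.symm hk
      · intro hc; exact Or.inl ((hm k).mpr hc)
  · -- first sighting of x: add it to s.1
    have hx1 : x ∉ s.1 := by simpa [PySem.Set.contains] using h1
    have hx2 : x ∉ s.2 := by simpa [PySem.Set.contains] using h2
    have hcx1 : c x ≠ 1 := fun hc => hx1 ((ho x).mpr hc)
    have hcx2 : ¬ 2 ≤ c x := fun hc => hx2 ((hm x).mpr hc)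
    have hcx : c x = 0 := by omega
    have hnd' : (PySem.Set.add s.1 x).Nodup := by
      rw [PySem.Set.add]
      split
      · exact hnd
      · next hco =>
        refine List.Nodup.append hnd (List.nodup_singleton x) ?_
        intro a ha hax
        simp only [List.mem_singleton] at hax
        subst hax
        exact absurd ((List.contains_iff_mem).mpr ha) (by simpa [PySem.Set.contains] using hco)
    refine ⟨hnd', fun k => ?_, fun k => ?_⟩ <;> beta_reduce <;> by_cases hk : x = k
    · subst hk; rw [if_pos rfl, PySem.Set.mem_add]
      exact ⟨fun _ => by omega, fun _ => Or.inr rfl⟩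
    · rw [if_neg hk, PySem.Set.mem_add]
      constructor
      · rintro (h' | h')
        · exact (ho k).mp h'
        · exact absurd h'.symm hk
      · intro hc; exact Or.inl ((ho k).mpr hc)
    · subst hk; rw [if_pos rfl]
      exact ⟨fun hx => absurd hx hx2, fun hc => absurd hc (by omega)⟩
    · rw [if_neg hk]; exact hm k

lemma pvInv_fold (l : List String) : ∀ (c : String → Nat) (s : PySem.Set String × PySem.Set String),
    pvInv c s → pvInv (fun k => c k + l.count k) (l.foldl pvBStep s) := by
  induction l with
  | nil => intro c s h; simpa using h
  | cons x l ih =>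
    intro c s h
    have := ih (fun k => if x = k then c k + 1 else c k) (pvBStep s x) (pvInv_step c s x h)
    have hfun : (fun k => (if x = k then c k + 1 else c k) + List.count k l)
        = (fun k => c k + List.count k (x :: l)) := by
      funext k
      simp only [List.count_cons, beq_iff_eq]
      by_cases hk : x = k
      · subst hk; simp; omega
      · simp [hk]
    simp only [List.foldl_cons]
    exact hfun ▸ this

-- ===== VERDICT (by name: the statement is the Claim_ definition above) =====
theorem num_single_locs_spec : Claim_equal_num_single_locs := by
  intro rows _ _
  unfold Spec_num_single_locs num_single_locs num_single_locs_alt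
  rw [pvA_dict, pvB_fold]
  show (List.foldl (fun ones station => if ((PySem.Dict.counter (pvLocs rows)).getD station 0 == 1) = true then ones + 1 else ones) 0 (PySem.Dict.counter (pvLocs rows)).keys)
      = (((pvLocs rows).foldl pvBStep (PySem.Set.empty, PySem.Set.empty)).1).len
  rw [PySem.Dict.keys_counter]
  simp only [PySem.Dict.getD_counter]
  rw [PySem.List.foldl_count_if (fun k => ((List.count k (pvLocs rows) : Int) == 1))]
  obtain ⟨hnd, ho, -⟩ := pvInv_fold (pvLocs rows) (fun _ => 0) (PySem.Set.empty, PySem.Set.empty)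
    ⟨List.nodup_nil, by simp [PySem.Set.empty], by simp [PySem.Set.empty]⟩
  simp only [Nat.zero_add] at ho
  rw [List.countP_eq_length_filter]
  have hperm : (((PySem.Set.ofList (pvLocs rows)).filter
      (fun k => ((List.count k (pvLocs rows) : Int) == 1))).Perm
      ((pvLocs rows).foldl pvBStep (PySem.Set.empty, PySem.Set.empty)).1) := by
    rw [List.perm_ext_iff_of_nodup ((PySem.Set.nodup_ofList _).filter _) hnd]
    intro a
    rw [ho a]
    simp only [List.mem_filter, PySem.Set.mem_ofList, beq_iff_eq]
    constructor
    · intro ⟨_, hc⟩; exact_mod_cast hc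
    · intro hc
      refine ⟨?_, by exact_mod_cast hc⟩
      have : 0 < List.count a (pvLocs rows) := by omega
      exact List.count_pos_iff.mp this
  simp [PySem.Set.len, hperm.length_eq]
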